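-- pv_equiv track=rewrite | github.com/MrBrantCode/unitest_baseline | mut_generate/mist_train_cf/cf_3465/solution.py | sum_of_third_elements
-- ===== SOURCE A (Python) =====
-- def sum_of_third_elements(lst):
--     new_lst = []
--     counter = 1
--     running_sum = 0
--     for i in range(1, len(lst)):
--         if (i-1) % 4 == 0 and (i+1) % 3 == 0:
--             running_sum += lst[i]
--         if (i+1) % 12 == 0:
--             new_lst.append(running_sum)
--             running_sum = 0
--     return new_lst
-- ===== SOURCE B (Python) =====
-- def sum_of_third_elements(lst):
--     # Indices selected by A are exactly i == 5 (mod 12); appends happen at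
--     # i == 11 (mod 12), so each output element is lst[s+5] for a full 12-block
--     # starting at s.
--     return [lst[s + 5] for s in range(0, len(lst), 12) if s + 11 < len(lst)]
-- ===== Notes on version B (the rewrite author's own statement) =====
-- stated objective: simpler
-- what changed: Replaces the index-by-index scan with counter/running_sum state and modular guards by a one-line comprehension over 12-block starts that picks lst[s+5] of each complete block (the two guards select exactly i = 5 mod 12, one hit per appended block).
import Mathlib
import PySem

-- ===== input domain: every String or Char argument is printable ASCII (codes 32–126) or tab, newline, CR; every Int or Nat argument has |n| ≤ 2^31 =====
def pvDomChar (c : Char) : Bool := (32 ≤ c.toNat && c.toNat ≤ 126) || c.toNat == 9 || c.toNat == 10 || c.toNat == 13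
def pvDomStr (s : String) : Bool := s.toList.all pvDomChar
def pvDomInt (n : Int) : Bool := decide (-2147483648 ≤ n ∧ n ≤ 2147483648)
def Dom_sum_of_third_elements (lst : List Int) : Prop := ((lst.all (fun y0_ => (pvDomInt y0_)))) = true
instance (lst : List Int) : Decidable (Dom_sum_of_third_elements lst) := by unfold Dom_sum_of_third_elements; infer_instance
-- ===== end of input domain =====

-- B replaces A's index scan with modular guards by a direct comprehension over
-- 12-block starts, picking lst[s+5] of each full block (objective: simpler).

-- ===== PORT A =====
-- loop body of A's for-loop: state = (new_lst, running_sum)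
def pvStepA (lst : List Int) (s : List Int × Int) (i : Int) : List Int × Int :=
  -- lst[i]: i ∈ range(1, len(lst)) is always in range, so pyGetD's default never fires
  let s1 := if PySem.Int.mod (i - 1) 4 = 0 ∧ PySem.Int.mod (i + 1) 3 = 0
            then (s.1, s.2 + PySem.List.pyGetD lst i 0) else s
  if PySem.Int.mod (i + 1) 12 = 0 then (s1.1 ++ [s1.2], 0) else s1

def sum_of_third_elements (lst : List Int) : List Int :=
  ((PySem.List.pyRange 1 (lst.length : Int) 1).foldl (pvStepA lst) ([], 0)).1

-- ===== PORT B =====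
def sum_of_third_elements_alt (lst : List Int) : List Int :=
  (((PySem.List.pyRange 0 (lst.length : Int) 12).filter
      (fun s => decide (s + 11 < (lst.length : Int)))).map
    -- lst[s+5]: the filter guarantees s+5 < len(lst), so pyGetD's default never fires
    (fun s => PySem.List.pyGetD lst (s + 5) 0))

-- ===== PRECONDITION & SPEC =====
def Spec_sum_of_third_elements (lst : List Int) (out : List Int) : Prop := out = sum_of_third_elements_alt lst
instance (lst : List Int) (out : List Int) : Decidable (Spec_sum_of_third_elements lst out) := by unfold Spec_sum_of_third_elements; infer_instance

-- ===== CLAIM (what is proved, stated in full; the proofs are below) =====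
def Claim_equal_sum_of_third_elements : Prop := ∀ (lst : List Int), Dom_sum_of_third_elements lst → Spec_sum_of_third_elements lst (sum_of_third_elements lst)

-- ===== LEMMAS AND PROOFS =====

-- the k-th output element: lst[12k+5]
def pvG (lst : List Int) (k : Nat) : Int := PySem.List.pyGetD lst ((12 * k + 5 : Nat) : Int) 0

-- A's first guard selects exactly i ≡ 5 (mod 12)
lemma pvCond1 (m : Nat) :
    (PySem.Int.mod ((m : Int) - 1) 4 = 0 ∧ PySem.Int.mod ((m : Int) + 1) 3 = 0) ↔ m % 12 = 5 := by
  rw [PySem.Int.mod_eq_emod_of_pos (a := (m : Int) - 1) (by norm_num), PySem.Int.mod_eq_emod_of_pos (a := (m : Int) + 1) (by norm_num)]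
  omega

-- A's append guard fires exactly at i ≡ 11 (mod 12)
lemma pvCond2 (m : Nat) : PySem.Int.mod ((m : Int) + 1) 12 = 0 ↔ m % 12 = 11 := by
  rw [PySem.Int.mod_eq_emod_of_pos (by norm_num)]
  omega

-- loop invariant for A after processing i = 1 .. m-1
lemma pvLoopA (lst : List Int) (m : Nat) :
    (PySem.List.pyRange 1 (m : Int) 1).foldl (pvStepA lst) ([], 0) =
      ((List.range (m / 12)).map (pvG lst), if 6 ≤ m % 12 then pvG lst (m / 12) else 0) := by
  induction m with
  | zero => simp [PySem.List.pyRange_one_eq_nil]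
  | succ m ih =>
    rcases Nat.eq_zero_or_pos m with hm | hm
    · subst hm
      norm_num [PySem.List.pyRange_one_eq_nil]
    · have hsplit : PySem.List.pyRange 1 ((m : Int) + 1) 1 =
          PySem.List.pyRange 1 (m : Int) 1 ++ [(m : Int)] :=
        PySem.List.pyRange_one_succ_right (by exact_mod_cast hm)
      push_cast
      rw [hsplit, List.foldl_append, ih]
      simp only [List.foldl_cons, List.foldl_nil, pvStepA, pvCond1, pvCond2]
      by_cases h5 : m % 12 = 5
      · have h11 : ¬ m % 12 = 11 := by omega
        have e1 : ¬ 6 ≤ m % 12 := by omega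
        have e2 : (m + 1) / 12 = m / 12 := by omega
        have e3 : (m + 1) % 12 = 6 := by omega
        have e4 : (12 * (m / 12) + 5 : Nat) = m := by omega
        simp [h5, e2, e3, pvG, e4]
      · by_cases h11 : m % 12 = 11
        · have e1 : 6 ≤ m % 12 := by omega
          have e2 : (m + 1) / 12 = m / 12 + 1 := by omega
          have e3 : (m + 1) % 12 = 0 := by omega
          simp [h11, e2, e3, List.range_succ]
        · have e2 : (m + 1) / 12 = m / 12 := by omega
          have e3 : (6 ≤ (m + 1) % 12) = (6 ≤ m % 12) := by
            simp only [eq_iff_iff]; omega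
          simp [h5, h11, e2, e3]

lemma pvFilterLtRange (q M : Nat) (h : q ≤ M) :
    (List.range M).filter (fun k => decide (k < q)) = List.range q := by
  induction M with
  | zero =>
    have : q = 0 := by omega
    simp [this]
  | succ M ih =>
    rcases Nat.lt_or_ge q (M + 1) with hq | hq
    · rw [List.range_succ, List.filter_append, ih (by omega)]
      simp
      omega
    · have : q = M + 1 := by omega
      subst this
      apply List.filter_eq_self.mpr
      intro a ha
      simp only [List.mem_range] at ha
      simpa using ha

-- B's comprehension produces exactly the block values lst[12k+5], k < len/12
lemma pvAltEq (lst : List Int) :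
    sum_of_third_elements_alt lst = (List.range (lst.length / 12)).map (pvG lst) := by
  unfold sum_of_third_elements_alt
  set n := lst.length with hn
  rw [PySem.List.pyRange_of_pos 0 (n : Int) (by norm_num)]
  have hM : (if (0 : Int) < (n : Int) then (((n : Int) - 0 + 12 - 1) / 12).toNat else 0) =
      (n + 11) / 12 := by
    split <;> omega
  rw [hM, List.filter_map, List.map_map]
  rw [List.filter_congr (q := fun k => decide (k < n / 12))
      (by intro k hk; simp only [List.mem_range] at hk; simp only [Function.comp]; simp; omega)]
  rw [pvFilterLtRange _ _ (by omega)]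
  apply List.map_congr_left
  intro k hk
  simp only [Function.comp, pvG]
  congr 1
  push_cast
  ring

-- ===== VERDICT (by name: the statement is the Claim_ definition above) =====
theorem sum_of_third_elements_spec : Claim_equal_sum_of_third_elements := by
  intro lst _
  show sum_of_third_elements lst = sum_of_third_elements_alt lst
  rw [pvAltEq, sum_of_third_elements, pvLoopA]
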